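-- pv_equiv track=rewrite | github.com/Rebel1124/ninetyOneCaseStudy | code/bondDescriptions.py | identify_sector
-- ===== SOURCE A (Python) =====
-- def identify_sector(issuer):
--     """Identify the economic sector based on the issuer"""
--     issuer_upper = issuer.upper()
--
--     if 'CASH' in issuer_upper:
--         return 'Cash'
--
--     if 'GOVERNMENT' in issuer_upper:
--         return 'Sovereign'
--
--     if 'NINETY ONE' in issuer_upper:
--         return 'Corp Bond'
--
--     if any(bank in issuer_upper for bank in ['STANDARD BANK', 'ABSA', 'NEDBANK', 'FIRSTRAND', 'INVESTEC']):
--         return 'Banking'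
--
--     if any(bank in issuer_upper for bank in ['LIBERTY', 'SANTAM', 'SANLAM', 'OLD MUTUAL', 'MOMENTUM']):
--         return 'Insurance'
--
--     if 'REDEFINE' in issuer_upper or 'GROWTHPOINT' in issuer_upper:
--         return 'Real Estate'
--
--     if any(bank in issuer_upper for bank in ['ESKOM', 'SANRAL', 'RAND WATER', 'TRANSNET']):
--         return 'SOE'
--
--     if any(bank in issuer_upper for bank in ['ETHEKWINI', 'CITY OF TSHWANE', 'CAPE TOWN']):
--         return 'Municipal'
--
--     return 'Credit'
-- ===== SOURCE B (Python) =====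
-- # Exhaustive scan: collect ALL matching (index, sector) hits over a flat keyword
-- # table, then pick the hit with the minimal index (no early exit, min instead of
-- # a first-match branch chain).
-- _TABLE = [
--     ('CASH', 'Cash'),
--     ('GOVERNMENT', 'Sovereign'),
--     ('NINETY ONE', 'Corp Bond'),
--     ('STANDARD BANK', 'Banking'), ('ABSA', 'Banking'), ('NEDBANK', 'Banking'),
--     ('FIRSTRAND', 'Banking'), ('INVESTEC', 'Banking'),
--     ('LIBERTY', 'Insurance'), ('SANTAM', 'Insurance'), ('SANLAM', 'Insurance'),
--     ('OLD MUTUAL', 'Insurance'), ('MOMENTUM', 'Insurance'),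
--     ('REDEFINE', 'Real Estate'), ('GROWTHPOINT', 'Real Estate'),
--     ('ESKOM', 'SOE'), ('SANRAL', 'SOE'), ('RAND WATER', 'SOE'), ('TRANSNET', 'SOE'),
--     ('ETHEKWINI', 'Municipal'), ('CITY OF TSHWANE', 'Municipal'), ('CAPE TOWN', 'Municipal'),
-- ]
--
-- def identify_sector(issuer):
--     u = issuer.upper()
--     hits = [(i, s) for i, (kw, s) in enumerate(_TABLE) if kw in u]
--     best = min(hits, key=lambda h: h[0]) if hits else None
--     return 'Credit' if best is None else best[1]
-- ===== Notes on version B (the rewrite author's own statement) =====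
-- stated objective: alternative
-- what changed: Instead of an early-returning if-chain over keyword groups, B flattens the rules into one (keyword, sector) table, exhaustively collects ALL matching hits with their indices in a single comprehension, and returns the sector of the minimal-index hit (default 'Credit'), so precedence is decided by an arithmetic min over a complete match set rather than by control flow.
import Mathlib
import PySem

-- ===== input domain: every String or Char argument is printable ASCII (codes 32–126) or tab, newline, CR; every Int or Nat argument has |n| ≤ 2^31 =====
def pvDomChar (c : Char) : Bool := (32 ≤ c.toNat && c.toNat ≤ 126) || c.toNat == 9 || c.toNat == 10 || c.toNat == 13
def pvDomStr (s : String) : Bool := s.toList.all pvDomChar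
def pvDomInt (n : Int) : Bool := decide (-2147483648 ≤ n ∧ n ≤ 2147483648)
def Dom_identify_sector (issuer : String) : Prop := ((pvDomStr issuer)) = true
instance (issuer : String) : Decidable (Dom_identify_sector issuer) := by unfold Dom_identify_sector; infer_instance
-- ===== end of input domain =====

-- B replaces A's early-returning if-chain by an exhaustive scan of a flat
-- (keyword, sector) table collecting ALL matching hits, then returns the sector
-- of the minimal-index hit (alternative decomposition; same cost).

-- ===== PORT A =====
def identify_sector (issuer : String) : String :=
  let issuer_upper := PySem.Str.upper issuer
  if PySem.Str.isIn "CASH" issuer_upper then "Cash"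
  else if PySem.Str.isIn "GOVERNMENT" issuer_upper then "Sovereign"
  else if PySem.Str.isIn "NINETY ONE" issuer_upper then "Corp Bond"
  else if ["STANDARD BANK", "ABSA", "NEDBANK", "FIRSTRAND", "INVESTEC"].any
      (fun bank => PySem.Str.isIn bank issuer_upper) then "Banking"
  else if ["LIBERTY", "SANTAM", "SANLAM", "OLD MUTUAL", "MOMENTUM"].any
      (fun bank => PySem.Str.isIn bank issuer_upper) then "Insurance"
  else if PySem.Str.isIn "REDEFINE" issuer_upper || PySem.Str.isIn "GROWTHPOINT" issuer_upper then "Real Estate"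
  else if ["ESKOM", "SANRAL", "RAND WATER", "TRANSNET"].any
      (fun bank => PySem.Str.isIn bank issuer_upper) then "SOE"
  else if ["ETHEKWINI", "CITY OF TSHWANE", "CAPE TOWN"].any
      (fun bank => PySem.Str.isIn bank issuer_upper) then "Municipal"
  else "Credit"

-- ===== PORT B =====
def flatTable : List (String × String) :=
  [ ("CASH", "Cash"),
    ("GOVERNMENT", "Sovereign"),
    ("NINETY ONE", "Corp Bond"),
    ("STANDARD BANK", "Banking"), ("ABSA", "Banking"), ("NEDBANK", "Banking"),
    ("FIRSTRAND", "Banking"), ("INVESTEC", "Banking"),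
    ("LIBERTY", "Insurance"), ("SANTAM", "Insurance"), ("SANLAM", "Insurance"),
    ("OLD MUTUAL", "Insurance"), ("MOMENTUM", "Insurance"),
    ("REDEFINE", "Real Estate"), ("GROWTHPOINT", "Real Estate"),
    ("ESKOM", "SOE"), ("SANRAL", "SOE"), ("RAND WATER", "SOE"), ("TRANSNET", "SOE"),
    ("ETHEKWINI", "Municipal"), ("CITY OF TSHWANE", "Municipal"), ("CAPE TOWN", "Municipal") ]

def identify_sector_alt (issuer : String) : String :=
  let u := PySem.Str.upper issuer
  let hits := (PySem.List.enumerate flatTable 0).filterMap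
      (fun p => if PySem.Str.isIn p.2.1 u then some (p.1, p.2.2) else none)
  let best := PySem.List.min? hits (fun h => h.1)
  match best with
  | none => "Credit"
  | some b => b.2

-- ===== PRECONDITION & SPEC =====
def Spec_identify_sector (issuer : String) (out : String) : Prop := out = identify_sector_alt issuer
instance (issuer : String) (out : String) : Decidable (Spec_identify_sector issuer out) := by unfold Spec_identify_sector; infer_instance

-- ===== CLAIM (what is proved, stated in full; the proofs are below) =====
def Claim_equal_identify_sector : Prop := ∀ (issuer : String), Dom_identify_sector issuer → Spec_identify_sector issuer (identify_sector issuer)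

-- ===== LEMMAS AND PROOFS =====

-- first-match chain over a flat table: the common reference form of both programs
def chainMatch (u : String) : List (String × String) → String
  | [] => "Credit"
  | (kw, sec) :: rest => if PySem.Str.isIn kw u then sec else chainMatch u rest

-- a fold computing min? keeps the accumulator when nothing beats it
theorem min_foldl_keep {α : Type} (key : α → Int) (x : α) (t : List α)
    (h : ∀ y ∈ t, ¬ key y < key x) :
    t.foldl
      (fun acc y =>
        match acc with
        | none => some y
        | some m => if key y < key m then some y else some m)
      (some x) = some x := by
  induction t with
  | nil => rfl
  | cons a t ih =>
      simp only [List.foldl_cons]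
      rw [if_neg (h a (by simp))]
      exact ih (fun y hy => h y (by simp [hy]))

theorem min?_cons_of_min {α : Type} (key : α → Int) (x : α) (t : List α)
    (h : ∀ y ∈ t, ¬ key y < key x) :
    PySem.List.min? (x :: t) key = some x := by
  simp only [PySem.List.min?, List.foldl_cons]
  exact min_foldl_keep key x t h

-- the min-of-all-hits scan equals the first-match chain, for any start index
theorem scan_eq (u : String) (l : List (String × String)) (s : Int) :
    (match PySem.List.min?
        ((PySem.List.enumerate l s).filterMap
          (fun p => if PySem.Str.isIn p.2.1 u then some (p.1, p.2.2) else none))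
        (fun h => h.1) with
     | none => "Credit"
     | some b => b.2) = chainMatch u l := by
  induction l generalizing s with
  | nil => simp [PySem.List.enumerate, PySem.List.min?, chainMatch]
  | cons hd tl ih =>
      obtain ⟨kw, sec⟩ := hd
      rw [PySem.List.enumerate_cons]
      by_cases hkw : PySem.Str.isIn kw u
      · simp only [List.filterMap_cons, hkw, if_pos, chainMatch]
        rw [min?_cons_of_min]
        intro y hy
        simp only [List.mem_filterMap] at hy
        obtain ⟨p, hp, hpy⟩ := hy
        rw [PySem.List.mem_enumerate_iff] at hp
        obtain ⟨k, hk, rfl⟩ := hp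
        split at hpy
        · cases hpy; simp; omega
        · cases hpy
      · simp only [List.filterMap_cons, hkw, chainMatch, Bool.false_eq_true,
          ite_false]
        exact ih (s + 1)

-- a maximal run of keywords sharing one sector collapses to a single 'any' test
theorem chainMatch_group (u : String) (kws : List String) (sec : String)
    (rest : List (String × String)) :
    chainMatch u (kws.map (fun k => (k, sec)) ++ rest)
      = if kws.any (fun k => PySem.Str.isIn k u) then sec else chainMatch u rest := by
  induction kws with
  | nil => simp
  | cons k kws ih =>
      simp only [List.map_cons, List.cons_append, chainMatch, List.any_cons]
      rw [ih]
      by_cases hk : PySem.Str.isIn k u = true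
      · rw [if_pos hk]
        simp only [hk, Bool.true_or]
        rfl
      · rw [if_neg hk]
        rw [Bool.not_eq_true] at hk
        simp only [hk, Bool.false_or]

-- ===== VERDICT (by name: the statement is the Claim_ definition above) =====
theorem identify_sector_spec : Claim_equal_identify_sector := by
  intro issuer _
  unfold Spec_identify_sector identify_sector_alt
  rw [scan_eq (PySem.Str.upper issuer) flatTable 0]
  rw [show flatTable =
      ["CASH"].map (fun k => (k, "Cash")) ++
      (["GOVERNMENT"].map (fun k => (k, "Sovereign")) ++
      (["NINETY ONE"].map (fun k => (k, "Corp Bond")) ++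
      (["STANDARD BANK","ABSA","NEDBANK","FIRSTRAND","INVESTEC"].map (fun k => (k, "Banking")) ++
      (["LIBERTY","SANTAM","SANLAM","OLD MUTUAL","MOMENTUM"].map (fun k => (k, "Insurance")) ++
      (["REDEFINE","GROWTHPOINT"].map (fun k => (k, "Real Estate")) ++
      (["ESKOM","SANRAL","RAND WATER","TRANSNET"].map (fun k => (k, "SOE")) ++
      (["ETHEKWINI","CITY OF TSHWANE","CAPE TOWN"].map (fun k => (k, "Municipal")) ++
        ([] : List (String × String))))))))) from rfl]
  rw [chainMatch_group, chainMatch_group, chainMatch_group, chainMatch_group,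
      chainMatch_group, chainMatch_group, chainMatch_group, chainMatch_group]
  unfold identify_sector
  simp only [chainMatch, List.any_cons, List.any_nil, Bool.or_false]
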